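-- pv_equiv track=rewrite | github.com/agustina-velazquez/Arrays-Bidimensionales | Desafio 2/paquete_desafio_2/funciones.py | sumar_filas_columnas
-- ===== SOURCE A (Python) =====
-- def sumar_filas_columnas(matriz: list, lugar: str)->list:
--     '''Recibe una matriz y un lugar como parámetros. El lugar indica si se sumará por filas o columanas
--     Retorna una lista, donde sus elementos son la suma de cada fila o cada columna.
--     '''
--     lista_suma = []
--
--     if lugar == "Filas":
--         for i in range(len(matriz)):
--             suma = 0
--             for j in range(len(matriz[i])):
--                 suma += matriz[i][j]
--             lista_suma += [suma]
--
--     else: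
--         columnas = matriz[0] #es la primera fila que tiene como tamaño el numero de columnas
--         for i in range(len(columnas)): #5 iter
--             suma = 0
--             for j in range(len(matriz)): #3 iter
--                 suma += matriz[j][i]
--             lista_suma += [suma]
--
--     return lista_suma
-- ===== SOURCE B (Python) =====
-- def _suma_filas(matriz):
--     if not matriz:
--         return []
--     return [sum(matriz[0])] + _suma_filas(matriz[1:])
--
--
-- def _suma_cols(filas, cols):
--     if not filas:
--         return [0] * cols
--     resto = _suma_cols(filas[1:], cols)
--     return [x + y for x, y in zip(filas[0], resto)]
--
--
-- def sumar_filas_columnas(matriz: list, lugar: str) -> list: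
--     if lugar == "Filas":
--         return _suma_filas(matriz)
--     return _suma_cols(matriz, len(matriz[0]))
-- ===== Notes on version B (the rewrite author's own statement) =====
-- stated objective: alternative
-- what changed: B is recursive on the list of rows: row sums are built by structural recursion, and column sums are built back-to-front by recursively summing the tail's column vector and adding the head row to it with a pairwise zip, instead of A's index-driven nested scans per row/column.
import Mathlib
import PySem

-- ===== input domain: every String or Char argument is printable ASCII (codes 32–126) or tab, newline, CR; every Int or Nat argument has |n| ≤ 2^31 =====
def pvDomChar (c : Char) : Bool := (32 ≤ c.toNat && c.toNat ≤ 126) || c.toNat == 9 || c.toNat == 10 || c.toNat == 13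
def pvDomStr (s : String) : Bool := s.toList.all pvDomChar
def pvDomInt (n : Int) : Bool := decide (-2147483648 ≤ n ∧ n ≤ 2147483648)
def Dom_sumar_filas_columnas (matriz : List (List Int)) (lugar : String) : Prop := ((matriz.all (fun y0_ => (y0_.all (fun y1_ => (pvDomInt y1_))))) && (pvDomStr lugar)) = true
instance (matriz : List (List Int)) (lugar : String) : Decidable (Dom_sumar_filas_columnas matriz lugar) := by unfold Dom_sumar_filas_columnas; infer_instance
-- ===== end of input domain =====

-- B replaces A's index-driven nested scans by structural recursion on the rows: row sums
-- recursively, column sums back-to-front by pairwise (zip) addition of each row onto the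
-- recursively computed column sums of the remaining rows.

-- ===== PORT A =====
def sumar_filas_columnas (matriz : List (List Int)) (lugar : String) : List Int :=
  if lugar == "Filas" then
    (PySem.List.pyRange 0 (matriz.length : Int) 1).foldl (fun lista_suma i =>
      let fila := PySem.List.pyGetD matriz i []
      lista_suma ++ [(PySem.List.pyRange 0 (fila.length : Int) 1).foldl
        (fun suma j => suma + PySem.List.pyGetD fila j 0) 0]) []
  else
    let columnas := PySem.List.pyGetD matriz 0 []
    (PySem.List.pyRange 0 (columnas.length : Int) 1).foldl (fun lista_suma i =>
      lista_suma ++ [(PySem.List.pyRange 0 (matriz.length : Int) 1).foldl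
        (fun suma j => suma + PySem.List.pyGetD (PySem.List.pyGetD matriz j []) i 0) 0]) []

-- ===== PORT B =====
def pvSumaFilas : List (List Int) → List Int
  | [] => []
  | fila :: rest => fila.sum :: pvSumaFilas rest

def pvSumaCols (cols : Nat) : List (List Int) → List Int
  | [] => List.replicate cols 0
  | fila :: rest =>
    let resto := pvSumaCols cols rest
    (fila.zip resto).map (fun p => p.1 + p.2)

def sumar_filas_columnas_alt (matriz : List (List Int)) (lugar : String) : List Int :=
  if lugar == "Filas" then
    pvSumaFilas matriz
  else
    pvSumaCols (PySem.List.pyGetD matriz 0 []).length matriz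

-- ===== PRECONDITION & SPEC =====
-- Pre_ excludes exactly the inputs on which the Python A raises IndexError: in the column
-- branch an empty matrix (matriz[0]) or a row shorter than the first row (matriz[j][i]).
def Pre_sumar_filas_columnas (matriz : List (List Int)) (lugar : String) : Prop :=
  lugar = "Filas" ∨ (matriz ≠ [] ∧ ∀ fila ∈ matriz, (matriz.headD []).length ≤ fila.length)
instance (matriz : List (List Int)) (lugar : String) : Decidable (Pre_sumar_filas_columnas matriz lugar) := by unfold Pre_sumar_filas_columnas; infer_instance
def pvWitness_sumar_filas_columnas : List (List Int) × String := ([[1, 2], [3, 4]], "Columnas")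

def Spec_sumar_filas_columnas (matriz : List (List Int)) (lugar : String) (out : List Int) : Prop := out = sumar_filas_columnas_alt matriz lugar
instance (matriz : List (List Int)) (lugar : String) (out : List Int) : Decidable (Spec_sumar_filas_columnas matriz lugar out) := by unfold Spec_sumar_filas_columnas; infer_instance

-- ===== CLAIM (what is proved, stated in full; the proofs are below) =====
def Claim_equal_sumar_filas_columnas : Prop := ∀ (matriz : List (List Int)) (lugar : String), Dom_sumar_filas_columnas matriz lugar → Pre_sumar_filas_columnas matriz lugar → Spec_sumar_filas_columnas matriz lugar (sumar_filas_columnas matriz lugar)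

-- ===== LEMMAS AND PROOFS =====

-- A's inner row loop is the row's sum.
theorem pvRowSum (fila : List Int) :
    (PySem.List.pyRange 0 (fila.length : Int) 1).foldl
        (fun suma j => suma + PySem.List.pyGetD fila j 0) 0 = fila.sum := by
  rw [PySem.List.foldl_pyRange_zero_pyGetD' fila 0 (fun s x => s + x) 0]
  simp [List.sum_eq_foldl]

-- A's row branch maps each row to its sum.
theorem pvRowA (matriz : List (List Int)) :
    (PySem.List.pyRange 0 (matriz.length : Int) 1).foldl (fun lista_suma i =>
      let fila := PySem.List.pyGetD matriz i []
      lista_suma ++ [(PySem.List.pyRange 0 (fila.length : Int) 1).foldl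
        (fun suma j => suma + PySem.List.pyGetD fila j 0) 0]) []
    = matriz.map (fun fila => fila.sum) := by
  rw [PySem.List.foldl_append_singleton_eq_map]
  simp only [pvRowSum]
  rw [show (fun i => (PySem.List.pyGetD matriz i ([]:List Int)).sum)
      = (fun fila => List.sum fila) ∘ (fun i => PySem.List.pyGetD matriz i []) from rfl,
    ← List.map_map]
  have h := PySem.List.map_pyGetD_pyRange_zero matriz ([]:List Int)
  simp only [PySem.List.len] at h
  rw [h]
  simp

-- A's column branch, as a map over column indices.
theorem pvColA (matriz : List (List Int)) (cols : Nat) :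
    (PySem.List.pyRange 0 (cols : Int) 1).foldl (fun lista_suma i =>
      lista_suma ++ [(PySem.List.pyRange 0 (matriz.length : Int) 1).foldl
        (fun suma j => suma + PySem.List.pyGetD (PySem.List.pyGetD matriz j []) i 0) 0]) []
    = (List.range cols).map (fun k => (matriz.map (fun row => row.getD k 0)).sum) := by
  rw [PySem.List.foldl_append_singleton_eq_map, PySem.List.pyRange_zero_natCast cols,
    List.map_map]
  simp only [List.nil_append]
  apply List.map_congr_left
  intro k _
  simp only [Function.comp]
  rw [PySem.List.foldl_pyRange_zero_pyGetD' matriz ([]:List Int)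
    (fun suma row => suma + PySem.List.pyGetD row (k : Int) 0) 0, PySem.List.foldl_add]
  simp

-- B's row helper maps each row to its sum.
theorem pvSumaFilas_eq (matriz : List (List Int)) :
    pvSumaFilas matriz = matriz.map (fun fila => fila.sum) := by
  induction matriz with
  | nil => rfl
  | cons f r ih => simp [pvSumaFilas, ih]

-- B's column helper, when every row is at least cols long, computes the column sums.
theorem pvSumaCols_eq (cols : Nat) (matriz : List (List Int))
    (h : ∀ fila ∈ matriz, cols ≤ fila.length) :
    pvSumaCols cols matriz
    = (List.range cols).map (fun k => (matriz.map (fun row => row.getD k 0)).sum) := by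
  induction matriz with
  | nil =>
    apply List.ext_getElem (by simp [pvSumaCols])
    intro i h1 h2
    simp [pvSumaCols]
  | cons fila rest ih =>
    have hf : cols ≤ fila.length := h fila (by simp)
    have ihr := ih (fun r hr => h r (by simp [hr]))
    simp only [pvSumaCols, ihr]
    have hlen : ((fila.zip ((List.range cols).map
        (fun k => (rest.map (fun row => row.getD k 0)).sum))).map
        (fun p => p.1 + p.2)).length = cols := by
      simp; omega
    apply List.ext_getElem (by simp; omega)
    intro i h1 h2
    have hi : i < cols := by rw [hlen] at h1; exact h1
    simp only [List.getElem_map, List.getElem_zip, List.getElem_range]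
    simp only [List.map_cons, List.sum_cons]
    rw [List.getD_eq_getElem fila 0 (by omega)]

-- ===== VERDICT (by name: the statement is the Claim_ definition above) =====
theorem sumar_filas_columnas_spec : Claim_equal_sumar_filas_columnas := by
  intro matriz lugar _ hpre
  unfold Spec_sumar_filas_columnas sumar_filas_columnas sumar_filas_columnas_alt
  by_cases hl : lugar == "Filas"
  · simp only [hl, if_true]
    rw [pvRowA, pvSumaFilas_eq]
  · simp only [hl, Bool.false_eq_true, if_false]
    have hlug : lugar ≠ "Filas" := by simpa using hl
    rcases hpre with h | ⟨hne, hrows⟩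
    · exact absurd h hlug
    · rw [pvColA matriz (PySem.List.pyGetD matriz 0 []).length]
      rw [pvSumaCols_eq]
      intro fila hf
      have : matriz.headD [] = PySem.List.pyGetD matriz 0 [] := by
        cases matriz with
        | nil => simp at hne
        | cons a r => simp [PySem.List.pyGetD, PySem.List.pyGet?, PySem.List.pyIdx?]
      rw [← this]
      exact hrows fila hf
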